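-- pv_equiv track=rewrite | github.com/swinelike/DeepWarden | APP/macros/autoritualcast.py | is_sequence_valid
-- ===== SOURCE A (Python) =====
-- def is_sequence_valid(sequence):
--     gap_found = False
--     has_content = False
--
--     for item in sequence:
--         if item is None:
--             gap_found = True
--         else:
--             has_content = True
--             if gap_found:
--                 return False # Found a letter after a gap like [X, None, C, V]
--     return has_content
-- ===== SOURCE B (Python) =====
-- import itertools
--
-- def is_sequence_valid(sequence):
--     it = iter(sequence)
--     prefix = list(itertools.takewhile(lambda x: x is not None, it))
--     return bool(prefix) and all(x is None for x in it)
-- ===== Notes on version B (the rewrite author's own statement) =====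
-- stated objective: idiomatic
-- what changed: Replaces the stateful flag loop (gap_found/has_content with an early return) by two sequential iterator phases: takewhile collects the leading content, then all() checks that nothing after the first gap is content.
import Mathlib
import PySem

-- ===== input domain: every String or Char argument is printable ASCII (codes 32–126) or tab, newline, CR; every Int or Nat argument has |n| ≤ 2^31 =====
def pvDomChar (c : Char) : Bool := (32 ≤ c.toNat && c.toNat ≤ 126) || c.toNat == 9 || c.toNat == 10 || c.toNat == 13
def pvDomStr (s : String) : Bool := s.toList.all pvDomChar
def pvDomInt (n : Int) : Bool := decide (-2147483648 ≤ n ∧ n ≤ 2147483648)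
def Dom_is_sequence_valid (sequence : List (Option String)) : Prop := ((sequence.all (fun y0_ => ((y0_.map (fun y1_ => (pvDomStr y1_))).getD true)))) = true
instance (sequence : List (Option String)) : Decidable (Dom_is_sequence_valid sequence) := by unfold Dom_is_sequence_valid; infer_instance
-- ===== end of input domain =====

-- B replaces A's stateful flag loop with an early return by two sequential
-- iterator phases (takewhile the content prefix, then check the rest is all None): idiomatic decomposition, same cost.
-- ===== PORT A =====
-- loop over the sequence carrying the two flags; `none` in the first branch position as in A
def isvLoop : List (Option String) → Bool → Bool → Bool
  | [], _, has_content => has_content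
  | none :: rest, _, has_content => isvLoop rest true has_content
  | some _ :: rest, gap_found, _ =>
      if gap_found then false else isvLoop rest gap_found true

def is_sequence_valid (sequence : List (Option String)) : Bool :=
  isvLoop sequence false false

-- ===== PORT B =====
-- prefix = takewhile(not-None); the shared iterator has then also consumed the first None,
-- so the remainder is dropWhile(isSome) with that first None dropped; all() over it.
def is_sequence_valid_alt (sequence : List (Option String)) : Bool :=
  let pfx := sequence.takeWhile (fun x => x.isSome)
  let rest := (sequence.dropWhile (fun x => x.isSome)).drop 1
  !pfx.isEmpty && rest.all (fun x => x.isNone)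

-- ===== PRECONDITION & SPEC =====
def Spec_is_sequence_valid (sequence : List (Option String)) (out : Bool) : Prop := out = is_sequence_valid_alt sequence
instance (sequence : List (Option String)) (out : Bool) : Decidable (Spec_is_sequence_valid sequence out) := by unfold Spec_is_sequence_valid; infer_instance

-- ===== CLAIM (what is proved, stated in full; the proofs are below) =====
def Claim_equal_is_sequence_valid : Prop := ∀ (sequence : List (Option String)), Dom_is_sequence_valid sequence → Spec_is_sequence_valid sequence (is_sequence_valid sequence)

-- ===== LEMMAS AND PROOFS =====

-- ===== VERDICT (by name: the statement is the Claim_ definition above) =====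
-- with gap found and content found, the loop returns "rest is all None"
theorem isvLoop_tt (s : List (Option String)) :
    isvLoop s true true = s.all (fun x => x.isNone) := by
  induction s with
  | nil => rfl
  | cons x r ih => cases x <;> simp [isvLoop, ih]

-- with a gap found but no content yet, the loop can never return true
theorem isvLoop_tf (s : List (Option String)) :
    isvLoop s true false = false := by
  induction s with
  | nil => rfl
  | cons x r ih => cases x <;> simp [isvLoop, ih]

-- with content found and no gap yet, the loop equals B's second phase
theorem isvLoop_ft (s : List (Option String)) :
    isvLoop s false true = ((s.dropWhile (fun x => x.isSome)).drop 1).all (fun x => x.isNone) := by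
  induction s with
  | nil => rfl
  | cons x r ih =>
    cases x with
    | none => simp [isvLoop, isvLoop_tt, List.dropWhile]
    | some v => simpa [isvLoop, List.dropWhile] using ih

theorem is_sequence_valid_spec : Claim_equal_is_sequence_valid := by
  intro s _
  unfold Spec_is_sequence_valid
  cases s with
  | nil => rfl
  | cons x r =>
    cases x with
    | none =>
      simp [is_sequence_valid, is_sequence_valid_alt, isvLoop, isvLoop_tf, List.takeWhile]
    | some v =>
      simp [is_sequence_valid, is_sequence_valid_alt, isvLoop, isvLoop_ft,
        List.takeWhile, List.dropWhile]
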